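-- pv_equiv track=rewrite | github.com/liujun5885/leetcode | leetcode-python/monotonic_stack/number_of_valid_subarrays.py | validSubarrays
-- ===== SOURCE A (Python) =====
-- from typing import List
--
-- def validSubarrays(nums: List[int]) -> int:
--     stack = []
--     ans = 0
--     for i in nums:
--         while len(stack) > 0 and stack[-1] > i:
--             stack.pop()
--         stack.append(i)
--         ans += len(stack)
--     return ans
-- ===== SOURCE B (Python) =====
-- from typing import List
--
--
-- def validSubarrays(nums: List[int]) -> int:
--     # For each start index i, count how far the subarray extends to the right
--     # while every element stays >= nums[i]; sum those run lengths.
--     ans = 0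
--     for i in range(len(nums)):
--         run = 0
--         for j in range(i, len(nums)):
--             if nums[j] < nums[i]:
--                 break
--             run += 1
--         ans += run
--     return ans
-- ===== Notes on version B (the rewrite author's own statement) =====
-- stated objective: simpler
-- what changed: Replaces the monotonic stack (pop-while and running stack length) with a direct per-start scan: for each start index, count rightward while elements stay >= the start value, and sum the run lengths.
import Mathlib
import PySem

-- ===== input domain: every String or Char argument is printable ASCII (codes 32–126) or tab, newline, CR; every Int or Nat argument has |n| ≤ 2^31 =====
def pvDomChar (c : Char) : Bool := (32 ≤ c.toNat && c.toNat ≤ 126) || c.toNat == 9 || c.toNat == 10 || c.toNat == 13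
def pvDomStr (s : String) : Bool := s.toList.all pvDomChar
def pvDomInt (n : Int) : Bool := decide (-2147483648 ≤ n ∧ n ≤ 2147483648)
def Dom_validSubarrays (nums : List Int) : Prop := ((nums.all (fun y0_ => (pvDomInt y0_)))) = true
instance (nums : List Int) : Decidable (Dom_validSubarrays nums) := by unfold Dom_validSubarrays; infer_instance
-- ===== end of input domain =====

-- B is a simpler per-start scan (no stack); same return value, no side effects in either.

-- ===== PORT A =====
-- The Python stack is kept top-first (head = stack[-1]); the inner `while … stack.pop()` loop:
def popLoop (stack : List Int) (i : Int) : List Int :=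
  match stack with
  | [] => []
  | x :: rest => if x > i then popLoop rest i else x :: rest

-- the `for i in nums` loop, carrying (stack, ans)
def validSubarraysLoop (nums : List Int) (stack : List Int) (ans : Int) : Int :=
  match nums with
  | [] => ans
  | i :: rest =>
      let stack' := i :: popLoop stack i   -- pops then `stack.append(i)`
      validSubarraysLoop rest stack' (ans + stack'.length)

def validSubarrays (nums : List Int) : Int :=
  validSubarraysLoop nums [] 0

-- ===== PORT B =====
-- inner loop: length of the prefix of `l` whose elements are all ≥ pivot (break at first smaller)
def innerCount (pivot : Int) (l : List Int) : Int :=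
  match l with
  | [] => 0
  | x :: rest => if x < pivot then 0 else 1 + innerCount pivot rest

-- outer loop over start indices = recursion over suffixes
def validSubarrays_alt (nums : List Int) : Int :=
  match nums with
  | [] => 0
  | x :: rest => innerCount x (x :: rest) + validSubarrays_alt rest

-- ===== PRECONDITION & SPEC =====
def Spec_validSubarrays (nums : List Int) (out : Int) : Prop := out = validSubarrays_alt nums
instance (nums : List Int) (out : Int) : Decidable (Spec_validSubarrays nums out) := by unfold Spec_validSubarrays; infer_instance

-- ===== CLAIM (what is proved, stated in full; the proofs are below) =====
def Claim_equal_validSubarrays : Prop := ∀ (nums : List Int), Dom_validSubarrays nums → Spec_validSubarrays nums (validSubarrays nums)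

-- ===== LEMMAS AND PROOFS =====

-- ans-free version of A's loop: total contribution to `ans` of processing `nums` from `stack`
def runA (nums : List Int) (stack : List Int) : Int :=
  match nums with
  | [] => 0
  | i :: rest =>
      let stack' := i :: popLoop stack i
      (stack'.length : Int) + runA rest stack'

theorem loop_eq_runA (nums stack : List Int) (ans : Int) :
    validSubarraysLoop nums stack ans = ans + runA nums stack := by
  induction nums generalizing stack ans with
  | nil => simp [validSubarraysLoop, runA]
  | cons i rest ih => simp [validSubarraysLoop, runA, ih]; ring

theorem popLoop_subset {stack : List Int} {i y : Int} (h : y ∈ popLoop stack i) : y ∈ stack := by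
  induction stack with
  | nil => simp [popLoop] at h
  | cons x rest ih =>
      by_cases hx : x > i
      · simp [popLoop, hx] at h
        exact List.mem_cons_of_mem _ (ih h)
      · simpa [popLoop, hx] using h

theorem popLoop_append_le {stack : List Int} {i x : Int} (hx : x ≤ i) :
    popLoop (stack ++ [x]) i = popLoop stack i ++ [x] := by
  induction stack with
  | nil => simp [popLoop]; omega
  | cons y rest ih =>
      by_cases hy : y > i <;> simp [popLoop, hy, ih]

theorem popLoop_all_gt {stack : List Int} {i : Int} (h : ∀ y ∈ stack, i < y) :
    popLoop stack i = [] := by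
  induction stack with
  | nil => rfl
  | cons y rest ih =>
      have hy : i < y := h y (List.mem_cons_self)
      simp [popLoop, hy]
      exact ih (fun z hz => h z (List.mem_cons_of_mem _ hz))

-- bottom element x (with everything above ≥ x) contributes exactly innerCount x nums
theorem runA_bottom (nums : List Int) :
    ∀ (stack : List Int) (x : Int), (∀ y ∈ stack, x ≤ y) →
      runA nums (stack ++ [x]) = runA nums stack + innerCount x nums := by
  induction nums with
  | nil => intro stack x _; simp [runA, innerCount]
  | cons i rest ih =>
      intro stack x hst
      by_cases hxi : x ≤ i
      · have hpop : popLoop (stack ++ [x]) i = popLoop stack i ++ [x] := popLoop_append_le hxi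
        have hmem : ∀ y ∈ i :: popLoop stack i, x ≤ y := by
          intro y hy
          rcases List.mem_cons.mp hy with rfl | hy
          · exact hxi
          · exact hst y (popLoop_subset hy)
        have := ih (i :: popLoop stack i) x hmem
        simp [runA, hpop, innerCount, not_lt.mpr hxi] at *
        rw [this]
        ring
      · have hix : i < x := by omega
        have h1 : popLoop (stack ++ [x]) i = [] := by
          apply popLoop_all_gt
          intro y hy
          rcases List.mem_append.mp hy with hy | hy
          · exact lt_of_lt_of_le hix (hst y hy)
          · simp at hy; omega
        have h2 : popLoop stack i = [] := by
          apply popLoop_all_gt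
          intro y hy
          exact lt_of_lt_of_le hix (hst y hy)
        simp [runA, h1, h2, innerCount, hix]

theorem runA_nil_eq_alt (nums : List Int) : runA nums [] = validSubarrays_alt nums := by
  induction nums with
  | nil => rfl
  | cons x rest ih =>
      have hb : runA rest ([] ++ [x]) = runA rest [] + innerCount x rest :=
        runA_bottom rest [] x (by simp)
      simp [runA, popLoop, validSubarrays_alt, innerCount, ← ih]
      simp at hb
      omega

-- ===== VERDICT (by name: the statement is the Claim_ definition above) =====
theorem validSubarrays_spec : Claim_equal_validSubarrays := by
  intro nums _
  unfold Spec_validSubarrays validSubarrays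
  rw [loop_eq_runA, runA_nil_eq_alt]
  ring
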